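-- pv_equiv track=rewrite | github.com/DICAP1/market_conditions | market_conditons_analyser2.py | final_strategy_decision
-- ===== SOURCE A (Python) =====
-- def final_strategy_decision(all_signals):
--     signal_weights = {
--         "Strong Trend": 3, "Weak Trend": 1,
--         "Momentum: Strong Upward (Long Position)": 2,
--         "Momentum: Strong Downward (Short Position)": 2,
--         "Bullish MACD Signal": 2, "Bearish MACD Signal": 2,
--         "Breakout Detected": 3, "High Volatility Cluster Detected": 2,
--         "Widened Spread Detected": 1
--     }
--
--     strategy_counts = {
--         "Buy Strategy": 0, "Sell Strategy": 0,
--         "Neutral Strategy": 0, "Scalping Strategy": 0,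
--         "Caution Strategy": 0
--     }
--
--     for signals in all_signals:
--         for signal in signals:
--             weight = signal_weights.get(signal, 0)
--             if "Upward" in signal or "Bullish" in signal:
--                 strategy_counts["Buy Strategy"] += weight
--             elif "Downward" in signal or "Bearish" in signal:
--                 strategy_counts["Sell Strategy"] += weight
--             elif "Neutral" in signal:
--                 strategy_counts["Neutral Strategy"] += weight
--             elif "Scalping" in signal:
--                 strategy_counts["Scalping Strategy"] += weight
--             elif "Caution" in signal:
--                 strategy_counts["Caution Strategy"] += weight
--
--     return max(strategy_counts, key=strategy_counts.get)
-- ===== SOURCE B (Python) =====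
-- BUY_SIGNALS = {"Momentum: Strong Upward (Long Position)", "Bullish MACD Signal"}
-- SELL_SIGNALS = {"Momentum: Strong Downward (Short Position)", "Bearish MACD Signal"}
--
--
-- def final_strategy_decision(all_signals):
--     # Only the four signals above both carry weight (2 each) and contain one of
--     # A's routing keywords; every other signal contributes 0 to every strategy,
--     # and the Neutral/Scalping/Caution buckets can never be positive.  With the
--     # Buy bucket first in insertion order, max() picks Buy on ties.
--     flat = [s for row in all_signals for s in row]
--     buy = 2 * sum(s in BUY_SIGNALS for s in flat)
--     sell = 2 * sum(s in SELL_SIGNALS for s in flat)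
--     return "Buy Strategy" if buy >= sell else "Sell Strategy"
-- ===== Notes on version B (the rewrite author's own statement) =====
-- stated objective: simpler
-- what changed: B drops A's weight dict, five-way substring routing and counts-dict-plus-max() entirely: only the four Momentum/MACD signals can ever move a bucket and only Buy/Sell can be positive, so B counts memberships of those four strings over the flattened signal list and returns Buy iff buy >= sell (Buy wins ties, matching A's insertion-order max()).
import Mathlib
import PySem

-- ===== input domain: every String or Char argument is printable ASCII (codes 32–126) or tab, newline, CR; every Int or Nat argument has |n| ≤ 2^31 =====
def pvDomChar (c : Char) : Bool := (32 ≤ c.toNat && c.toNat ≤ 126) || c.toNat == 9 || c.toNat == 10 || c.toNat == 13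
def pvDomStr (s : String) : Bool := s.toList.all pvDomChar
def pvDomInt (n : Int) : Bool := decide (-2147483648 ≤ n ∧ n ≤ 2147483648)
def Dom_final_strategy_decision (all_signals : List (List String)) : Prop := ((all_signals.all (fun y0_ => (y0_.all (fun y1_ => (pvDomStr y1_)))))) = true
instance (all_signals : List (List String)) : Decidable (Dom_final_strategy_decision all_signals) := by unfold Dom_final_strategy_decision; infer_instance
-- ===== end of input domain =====

-- B replaces A's weighted-dict accumulation plus max() by two keyword-free membership
-- counts over a flattened signal list and a closed-form Buy-vs-Sell comparison (simpler).

-- ===== PORT A =====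
def pvSignalWeights : PySem.Dict String Int := PySem.Dict.ofList [
  ("Strong Trend", 3), ("Weak Trend", 1),
  ("Momentum: Strong Upward (Long Position)", 2),
  ("Momentum: Strong Downward (Short Position)", 2),
  ("Bullish MACD Signal", 2), ("Bearish MACD Signal", 2),
  ("Breakout Detected", 3), ("High Volatility Cluster Detected", 2),
  ("Widened Spread Detected", 1)]

def pvInitialCounts : PySem.Dict String Int := PySem.Dict.ofList [
  ("Buy Strategy", 0), ("Sell Strategy", 0), ("Neutral Strategy", 0),
  ("Scalping Strategy", 0), ("Caution Strategy", 0)]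

-- the body of A's inner loop; 'strategy_counts[k] += weight' is Dict.modify k 0 (· + weight),
-- exact here because every updated key is present in the dict from initialisation on
def pvApplySignal (d : PySem.Dict String Int) (signal : String) : PySem.Dict String Int :=
  let weight := pvSignalWeights.getD signal 0
  if PySem.Str.isIn "Upward" signal || PySem.Str.isIn "Bullish" signal then
    d.modify "Buy Strategy" 0 (· + weight)
  else if PySem.Str.isIn "Downward" signal || PySem.Str.isIn "Bearish" signal then
    d.modify "Sell Strategy" 0 (· + weight)
  else if PySem.Str.isIn "Neutral" signal then
    d.modify "Neutral Strategy" 0 (· + weight)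
  else if PySem.Str.isIn "Scalping" signal then
    d.modify "Scalping Strategy" 0 (· + weight)
  else if PySem.Str.isIn "Caution" signal then
    d.modify "Caution Strategy" 0 (· + weight)
  else d

def final_strategy_decision (all_signals : List (List String)) : String :=
  let strategy_counts :=
    all_signals.foldl (fun d signals => signals.foldl pvApplySignal d) pvInitialCounts
  -- max(strategy_counts, key=strategy_counts.get): first key with maximal value; the dict
  -- always has its five keys, so Python's max never sees an empty iterable (.getD "" unreachable)
  (PySem.List.max? strategy_counts.keys (fun k => strategy_counts.getD k 0)).getD ""

-- ===== PORT B =====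
-- the set literals BUY_SIGNALS / SELL_SIGNALS (distinct elements; only membership is used)
def pvBuySignals : List String :=
  ["Momentum: Strong Upward (Long Position)", "Bullish MACD Signal"]
def pvSellSignals : List String :=
  ["Momentum: Strong Downward (Short Position)", "Bearish MACD Signal"]

def final_strategy_decision_alt (all_signals : List (List String)) : String :=
  let flat := all_signals.flatMap (fun row => row)
  let buy : Int := 2 * (flat.map (fun s => if pvBuySignals.contains s then (1 : Int) else 0)).sum
  let sell : Int := 2 * (flat.map (fun s => if pvSellSignals.contains s then (1 : Int) else 0)).sum
  if buy ≥ sell then "Buy Strategy" else "Sell Strategy"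

-- ===== PRECONDITION & SPEC =====
def Spec_final_strategy_decision (all_signals : List (List String)) (out : String) : Prop := out = final_strategy_decision_alt all_signals
instance (all_signals : List (List String)) (out : String) : Decidable (Spec_final_strategy_decision all_signals out) := by unfold Spec_final_strategy_decision; infer_instance

-- ===== CLAIM (what is proved, stated in full; the proofs are below) =====
def Claim_equal_final_strategy_decision : Prop := ∀ (all_signals : List (List String)), Dom_final_strategy_decision all_signals → Spec_final_strategy_decision all_signals (final_strategy_decision all_signals)

-- ===== LEMMAS AND PROOFS =====

-- the shape A's counts dict keeps throughout the loop: Buy/Sell symbolic, the rest stuck at 0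
def pvMk (b s : Int) : PySem.Dict String Int :=
  PySem.Dict.mk [("Buy Strategy", b), ("Sell Strategy", s), ("Neutral Strategy", 0),
                 ("Scalping Strategy", 0), ("Caution Strategy", 0)]

lemma pvMk_modify_buy (b s w : Int) :
    (pvMk b s).modify "Buy Strategy" 0 (· + w) = pvMk (b + w) s := by
  simp [pvMk, PySem.Dict.modify, PySem.Dict.insert, PySem.Dict.getD, PySem.Dict.get?,
        PySem.Dict.contains]

lemma pvMk_modify_sell (b s w : Int) :
    (pvMk b s).modify "Sell Strategy" 0 (· + w) = pvMk b (s + w) := by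
  simp [pvMk, PySem.Dict.modify, PySem.Dict.insert, PySem.Dict.getD, PySem.Dict.get?,
        PySem.Dict.contains]

lemma pvWeights_getD_of_unknown (sig : String)
    (h1 : ¬ sig = "Strong Trend") (h2 : ¬ sig = "Weak Trend")
    (h3 : ¬ sig = "Momentum: Strong Upward (Long Position)")
    (h4 : ¬ sig = "Momentum: Strong Downward (Short Position)")
    (h5 : ¬ sig = "Bullish MACD Signal") (h6 : ¬ sig = "Bearish MACD Signal")
    (h7 : ¬ sig = "Breakout Detected") (h8 : ¬ sig = "High Volatility Cluster Detected")
    (h9 : ¬ sig = "Widened Spread Detected") :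
    pvSignalWeights.getD sig 0 = 0 := by
  rw [show pvSignalWeights = PySem.Dict.mk [
    ("Strong Trend", 3), ("Weak Trend", 1),
    ("Momentum: Strong Upward (Long Position)", 2),
    ("Momentum: Strong Downward (Short Position)", 2),
    ("Bullish MACD Signal", 2), ("Bearish MACD Signal", 2),
    ("Breakout Detected", 3), ("High Volatility Cluster Detected", 2),
    ("Widened Spread Detected", 1)] from by decide]
  simp [PySem.Dict.getD, PySem.Dict.get?, Ne.symm h1, Ne.symm h2, Ne.symm h3,
        Ne.symm h4, Ne.symm h5, Ne.symm h6, Ne.symm h7, Ne.symm h8, Ne.symm h9]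

-- one signal's effect on the counts: only the four table signals move anything
lemma pvApply_noop (d : PySem.Dict String Int) (sig : String)
    (h1 : (PySem.Str.isIn "Upward" sig || PySem.Str.isIn "Bullish" sig) = false)
    (h2 : (PySem.Str.isIn "Downward" sig || PySem.Str.isIn "Bearish" sig) = false)
    (h3 : PySem.Str.isIn "Neutral" sig = false)
    (h4 : PySem.Str.isIn "Scalping" sig = false)
    (h5 : PySem.Str.isIn "Caution" sig = false) :
    pvApplySignal d sig = d := by
  simp only [pvApplySignal, h1, h2, h3, h4, h5]; simp

lemma pvApplySignal_mk (sig : String) (b s : Int) :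
    pvApplySignal (pvMk b s) sig =
      pvMk (b + (if pvBuySignals.contains sig then 2 else 0))
           (s + (if pvSellSignals.contains sig then 2 else 0)) := by
  by_cases c3 : sig = "Momentum: Strong Upward (Long Position)"
  · subst c3
    simp only [pvApplySignal]
    rw [show pvSignalWeights.getD "Momentum: Strong Upward (Long Position)" 0 = 2 from by decide,
        if_pos (by decide), pvMk_modify_buy,
        show pvBuySignals.contains "Momentum: Strong Upward (Long Position)" = true from by decide,
        show pvSellSignals.contains "Momentum: Strong Upward (Long Position)" = false from by decide]
    simp
  by_cases c4 : sig = "Momentum: Strong Downward (Short Position)"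
  · subst c4
    simp only [pvApplySignal]
    rw [show pvSignalWeights.getD "Momentum: Strong Downward (Short Position)" 0 = 2 from by decide,
        if_neg (by decide), if_pos (by decide), pvMk_modify_sell,
        show pvBuySignals.contains "Momentum: Strong Downward (Short Position)" = false from by decide,
        show pvSellSignals.contains "Momentum: Strong Downward (Short Position)" = true from by decide]
    simp
  by_cases c5 : sig = "Bullish MACD Signal"
  · subst c5
    simp only [pvApplySignal]
    rw [show pvSignalWeights.getD "Bullish MACD Signal" 0 = 2 from by decide,
        if_pos (by decide), pvMk_modify_buy,
        show pvBuySignals.contains "Bullish MACD Signal" = true from by decide,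
        show pvSellSignals.contains "Bullish MACD Signal" = false from by decide]
    simp
  by_cases c6 : sig = "Bearish MACD Signal"
  · subst c6
    simp only [pvApplySignal]
    rw [show pvSignalWeights.getD "Bearish MACD Signal" 0 = 2 from by decide,
        if_neg (by decide), if_pos (by decide), pvMk_modify_sell,
        show pvBuySignals.contains "Bearish MACD Signal" = false from by decide,
        show pvSellSignals.contains "Bearish MACD Signal" = true from by decide]
    simp
  -- sig is none of the four table signals: its contribution is zero
  have hb : pvBuySignals.contains sig = false := by
    simp [pvBuySignals, c3, c5]
  have hs : pvSellSignals.contains sig = false := by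
    simp [pvSellSignals, c4, c6]
  rw [hb, hs]
  by_cases c1 : sig = "Strong Trend"
  · subst c1
    rw [pvApply_noop _ _ (by decide) (by decide) (by decide) (by decide) (by decide)]; simp
  by_cases c2 : sig = "Weak Trend"
  · subst c2
    rw [pvApply_noop _ _ (by decide) (by decide) (by decide) (by decide) (by decide)]; simp
  by_cases c7 : sig = "Breakout Detected"
  · subst c7
    rw [pvApply_noop _ _ (by decide) (by decide) (by decide) (by decide) (by decide)]; simp
  by_cases c8 : sig = "High Volatility Cluster Detected"
  · subst c8
    rw [pvApply_noop _ _ (by decide) (by decide) (by decide) (by decide) (by decide)]; simp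
  by_cases c9 : sig = "Widened Spread Detected"
  · subst c9
    rw [pvApply_noop _ _ (by decide) (by decide) (by decide) (by decide) (by decide)]; simp
  -- sig carries no weight at all: whatever branch fires adds 0
  have hw : pvSignalWeights.getD sig 0 = 0 :=
    pvWeights_getD_of_unknown sig c1 c2 c3 c4 c5 c6 c7 c8 c9
  rw [pvApplySignal]
  simp only [hw]
  split_ifs <;> (try exact (‹False›).elim) <;>
    simp [pvMk, PySem.Dict.modify, PySem.Dict.insert,
          PySem.Dict.getD, PySem.Dict.get?, PySem.Dict.contains]

lemma pvInner_loop (sigs : List String) (b s : Int) :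
    sigs.foldl pvApplySignal (pvMk b s) =
      pvMk (b + 2 * (sigs.countP (fun s => pvBuySignals.contains s) : Int)) (s + 2 * (sigs.countP (fun s => pvSellSignals.contains s) : Int)) := by
  induction sigs generalizing b s with
  | nil => simp
  | cons x xs ih =>
    simp only [List.foldl_cons, pvApplySignal_mk, ih, List.countP_cons]
    congr 1 <;> · split_ifs <;> push_cast <;> ring

lemma pvOuter_loop (all : List (List String)) (b s : Int) :
    all.foldl (fun d signals => signals.foldl pvApplySignal d) (pvMk b s) =
      pvMk (b + 2 * (all.flatten.countP (fun s => pvBuySignals.contains s) : Int))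
           (s + 2 * (all.flatten.countP (fun s => pvSellSignals.contains s) : Int)) := by
  induction all generalizing b s with
  | nil => simp
  | cons row rest ih =>
    simp only [List.foldl_cons, pvInner_loop, ih, List.flatten_cons, List.countP_append]
    congr 1 <;> push_cast <;> ring

lemma pvMax_mk (b s : Int) (hb : 0 ≤ b) (hs : 0 ≤ s) :
    ((PySem.List.max? (pvMk b s).keys (fun k => (pvMk b s).getD k 0)).getD "") =
      (if s ≤ b then "Buy Strategy" else "Sell Strategy") := by
  by_cases hbs : s ≤ b
  · simp [pvMk, PySem.List.max?, PySem.Dict.getD, PySem.Dict.get?, PySem.Dict.keys,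
          hbs, not_lt.mpr hbs, not_lt.mpr hb]
  · simp [pvMk, PySem.List.max?, PySem.Dict.getD, PySem.Dict.get?, PySem.Dict.keys,
          hbs, not_le.mp hbs, not_lt.mpr hs]

lemma pvSum_indicator (l : List String) (p : List String) :
    (l.map (fun s => if p.contains s then (1 : Int) else 0)).sum =
      (l.countP (fun s => p.contains s) : Int) := by
  induction l with
  | nil => simp
  | cons x xs ih => simp only [List.map_cons, List.sum_cons, ih, List.countP_cons]
                    split_ifs <;> push_cast <;> ring

-- ===== VERDICT (by name: the statement is the Claim_ definition above) =====
theorem final_strategy_decision_spec : Claim_equal_final_strategy_decision := by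
  intro all _
  unfold Spec_final_strategy_decision final_strategy_decision final_strategy_decision_alt
  rw [show pvInitialCounts = pvMk 0 0 from by decide]
  rw [pvOuter_loop]
  rw [pvMax_mk _ _ (by positivity) (by positivity)]
  rw [show (all.flatMap fun row => row) = all.flatten from by simp]
  simp only [pvSum_indicator, ge_iff_le]
  split_ifs <;> first | rfl | omega
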